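-- pv_equiv track=rewrite | github.com/mireklzicar/cellarc | scripts/plots/plot_dataset_stats.py | _format_family_label
-- ===== SOURCE A (Python) =====
-- from typing import Dict, Iterable, List, Optional
--
-- def _format_family_label(name: str) -> str:
--     if not name:
--         return "Unknown"
--     cleaned = str(name).strip().replace("_", " ")
--     tokens = cleaned.split()
--     result: List[str] = []
--     i = 0
--     while i < len(tokens):
--         token = tokens[i].lower()
--         next_token = tokens[i + 1].lower() if i + 1 < len(tokens) else None
--         if token == "mod" and next_token in {"k", "(k)"}:
--             result.append("mod(k)")
--             i += 2
--             continue
--         if token.endswith("(k)"):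
--             result.append(token)
--         elif token in {"ca", "io"}:
--             result.append(token.upper())
--         else:
--             result.append(token.capitalize())
--         i += 1
--     return " ".join(result)
-- ===== SOURCE B (Python) =====
-- def _format_family_label(name: str) -> str:
--     if not name:
--         return "Unknown"
--     tokens = [t.lower() for t in str(name).strip().replace("_", " ").split()]
--     merged = []
--     for t in tokens:
--         if merged and merged[-1] == "mod" and t in ("k", "(k)"):
--             merged = merged[:-1] + ["mod(k)"]
--         else:
--             merged = merged + [t]
--
--     def fmt(t):
--         if t.endswith("(k)"):
--             return t
--         if t in ("ca", "io"):
--             return t.upper()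
--         return t.capitalize()
--
--     return " ".join(fmt(t) for t in merged)
-- ===== Notes on version B (the rewrite author's own statement) =====
-- stated objective: alternative
-- what changed: Replaces A's index-driven while loop that interleaves pair-skipping with per-token formatting by three separate passes: lowercase all tokens, a stack-style fold that merges an adjacent modulus/parameter token pair, then a pure formatting map joined at the end.
import Mathlib
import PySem

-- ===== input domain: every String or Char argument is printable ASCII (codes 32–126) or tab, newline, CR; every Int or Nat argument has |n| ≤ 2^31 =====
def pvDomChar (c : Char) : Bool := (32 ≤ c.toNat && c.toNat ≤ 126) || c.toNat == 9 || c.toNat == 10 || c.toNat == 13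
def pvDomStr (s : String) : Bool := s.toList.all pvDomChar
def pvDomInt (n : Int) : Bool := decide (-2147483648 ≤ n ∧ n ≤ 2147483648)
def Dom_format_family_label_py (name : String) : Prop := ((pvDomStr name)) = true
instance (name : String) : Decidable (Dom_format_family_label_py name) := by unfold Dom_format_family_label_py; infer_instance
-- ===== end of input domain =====

-- B replaces A's index-skipping while loop by a lower-everything pass, a stack-style merge fold, and a
-- separate formatting map; same return value, objective: alternative decomposition (no speed claim).

-- ===== PORT A =====
-- hand port of Python str.capitalize (PySem has no capitalize): first char uppercased, rest lowercased;
-- exact on the ASCII domain.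
def pyCapitalize (cs : List Char) : List Char :=
  match cs with
  | [] => []
  | c :: rest => PySem.Chars.upperChar c :: rest.map PySem.Chars.lowerChar

-- A's while loop over tokens, consuming one or two tokens per step.
def fmtLoopA : List (List Char) → List (List Char)
  | [] => []
  | [t] =>
    [if PySem.Chars.endswith (PySem.Chars.lower t) "(k)".toList then PySem.Chars.lower t
     else if PySem.Chars.lower t = "ca".toList ∨ PySem.Chars.lower t = "io".toList then
       PySem.Chars.upper (PySem.Chars.lower t)
     else pyCapitalize (PySem.Chars.lower t)]
  | t :: u :: rest =>
    -- token = lower t, next_token = lower u, written inline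
    if PySem.Chars.lower t = "mod".toList ∧
        (PySem.Chars.lower u = "k".toList ∨ PySem.Chars.lower u = "(k)".toList) then
      "mod(k)".toList :: fmtLoopA rest
    else
      (if PySem.Chars.endswith (PySem.Chars.lower t) "(k)".toList then PySem.Chars.lower t
       else if PySem.Chars.lower t = "ca".toList ∨ PySem.Chars.lower t = "io".toList then
         PySem.Chars.upper (PySem.Chars.lower t)
       else pyCapitalize (PySem.Chars.lower t)) :: fmtLoopA (u :: rest)

def format_family_label_py (name : String) : String :=
  if name.toList = [] then "Unknown"
  else
    -- cleaned = strip(name).replace("_"," "); tokens = cleaned.split()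
    String.ofList (PySem.Chars.join " ".toList (fmtLoopA (PySem.Chars.split₀
      (PySem.Chars.replace (PySem.Chars.strip name.toList) "_".toList " ".toList))))

-- ===== PORT B =====
-- one step of B's merge fold: collapse a trailing "mod" with a following "k"/"(k)"
def mergeStep (acc : List (List Char)) (t : List Char) : List (List Char) :=
  if acc ≠ [] ∧ acc.getLast? = some "mod".toList ∧ (t = "k".toList ∨ t = "(k)".toList) then
    acc.dropLast ++ ["mod(k)".toList]
  else acc ++ [t]

-- B's per-token formatter
def fmtB (t : List Char) : List Char :=
  if PySem.Chars.endswith t "(k)".toList then t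
  else if t = "ca".toList ∨ t = "io".toList then PySem.Chars.upper t
  else pyCapitalize t

def format_family_label_py_alt (name : String) : String :=
  if name.toList = [] then "Unknown"
  else
    -- tokens = lowered split of strip(name).replace("_"," "); merged = fold of mergeStep
    String.ofList (PySem.Chars.join " ".toList
      ((((PySem.Chars.split₀ (PySem.Chars.replace (PySem.Chars.strip name.toList)
          "_".toList " ".toList)).map PySem.Chars.lower).foldl mergeStep []).map fmtB))

-- ===== PRECONDITION & SPEC =====
def Spec_format_family_label_py (name : String) (out : String) : Prop := out = format_family_label_py_alt name
instance (name : String) (out : String) : Decidable (Spec_format_family_label_py name out) := by unfold Spec_format_family_label_py; infer_instance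

-- ===== CLAIM (what is proved, stated in full; the proofs are below) =====
def Claim_equal_format_family_label_py : Prop := ∀ (name : String), Dom_format_family_label_py name → Spec_format_family_label_py name (format_family_label_py name)

-- ===== LEMMAS AND PROOFS =====

@[simp] lemma tl_mod : "mod".toList = ['m','o','d'] := rfl
@[simp] lemma tl_k : "k".toList = ['k'] := rfl
@[simp] lemma tl_pk : "(k)".toList = ['(','k',')'] := rfl
@[simp] lemma tl_modk : "mod(k)".toList = ['m','o','d','(','k',')'] := rfl
@[simp] lemma tl_ca : "ca".toList = ['c','a'] := rfl
@[simp] lemma tl_io : "io".toList = ['i','o'] := rfl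

-- proof-only helper: the merge pass as a flagged recursion (flag = a "mod" is pending)
def mergeRec : Bool → List (List Char) → List (List Char)
  | false, [] => []
  | true, [] => ["mod".toList]
  | false, t :: r =>
      if PySem.Chars.lower t = "mod".toList then mergeRec true r
      else PySem.Chars.lower t :: mergeRec false r
  | true, u :: r =>
      if PySem.Chars.lower u = "k".toList ∨ PySem.Chars.lower u = "(k)".toList then
        "mod(k)".toList :: mergeRec false r
      else if PySem.Chars.lower u = "mod".toList then "mod".toList :: mergeRec true r
      else "mod".toList :: PySem.Chars.lower u :: mergeRec false r

lemma fmtB_modk : fmtB "mod(k)".toList = "mod(k)".toList := by decide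

lemma mergeRec_true_cons (u : List Char) (r : List (List Char))
    (hk : ¬ (PySem.Chars.lower u = "k".toList ∨ PySem.Chars.lower u = "(k)".toList)) :
    mergeRec true (u :: r) = "mod".toList :: mergeRec false (u :: r) := by
  conv_lhs => rw [mergeRec]
  rw [if_neg hk]
  by_cases hm : PySem.Chars.lower u = "mod".toList
  · rw [if_pos hm]
    conv_rhs => rw [mergeRec]
    rw [if_pos hm]
  · rw [if_neg hm]
    conv_rhs => rw [mergeRec]
    rw [if_neg hm]

lemma fmtLoopA_eq_map (ts : List (List Char)) :
    fmtLoopA ts = (mergeRec false ts).map fmtB := by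
  induction ts using fmtLoopA.induct with
  | case1 => rfl
  | case2 t =>
      conv_lhs => rw [fmtLoopA]
      conv_rhs => rw [mergeRec]
      by_cases hm : PySem.Chars.lower t = "mod".toList
      · rw [if_pos hm, hm]
        conv_rhs => rw [mergeRec]
        decide
      · rw [if_neg hm]
        rfl
  | case3 t u rest h ih =>
      obtain ⟨hm, hk⟩ := h
      rw [fmtLoopA, if_pos ⟨hm, hk⟩, mergeRec, if_pos hm, mergeRec, if_pos hk,
        List.map_cons, fmtB_modk, ih]
  | case4 t u rest h ih =>
      by_cases hm : PySem.Chars.lower t = "mod".toList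
      · have hk : ¬ (PySem.Chars.lower u = "k".toList ∨ PySem.Chars.lower u = "(k)".toList) := by
          intro hc; exact h ⟨hm, hc⟩
        rw [fmtLoopA, if_neg h, mergeRec, if_pos hm, mergeRec_true_cons u rest hk,
          List.map_cons, ih, hm]
        simp [fmtB]
      · rw [fmtLoopA, if_neg h, mergeRec, if_neg hm, List.map_cons, ih, fmtB]

lemma foldl_mergeStep (ts : List (List Char)) :
    ∀ (acc : List (List Char)) (b : Bool),
      (b = false → acc.getLast? ≠ some "mod".toList) →
      List.foldl mergeStep (if b then acc ++ ["mod".toList] else acc) (ts.map PySem.Chars.lower)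
        = acc ++ mergeRec b ts := by
  induction ts with
  | nil =>
      intro acc b h
      cases b with
      | false => simp [mergeRec]
      | true => simp [mergeRec]
  | cons t r ih =>
      intro acc b h
      cases b with
      | false =>
          have hlast := h rfl
          have hstep : mergeStep acc (PySem.Chars.lower t) = acc ++ [PySem.Chars.lower t] := by
            unfold mergeStep
            rw [if_neg]; rintro ⟨-, h2, -⟩; exact hlast h2
          rw [if_neg (by simp), List.map_cons, List.foldl_cons, hstep]
          by_cases hm : PySem.Chars.lower t = "mod".toList
          · have := ih acc true (by simp)
            rw [if_pos rfl] at this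
            rw [hm, this, mergeRec, if_pos hm]
          · have := ih (acc ++ [PySem.Chars.lower t]) false
              (by intro _; simp [List.getLast?_append]; exact hm)
            rw [if_neg (by simp)] at this
            rw [this, mergeRec, if_neg hm, List.append_assoc]
            rfl
      | true =>
          rw [if_pos rfl, List.map_cons, List.foldl_cons]
          by_cases hk : PySem.Chars.lower t = "k".toList ∨ PySem.Chars.lower t = "(k)".toList
          · have hstep : mergeStep (acc ++ ["mod".toList]) (PySem.Chars.lower t)
                = acc ++ ["mod(k)".toList] := by
              unfold mergeStep
              rw [if_pos ⟨by simp, by simp [List.getLast?_append], hk⟩]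
              simp
            have := ih (acc ++ ["mod(k)".toList]) false
              (by intro _; simp [List.getLast?_append])
            rw [if_neg (by simp)] at this
            rw [hstep, this, mergeRec, if_pos hk, List.append_assoc]
            rfl
          · have hstep : mergeStep (acc ++ ["mod".toList]) (PySem.Chars.lower t)
                = (acc ++ ["mod".toList]) ++ [PySem.Chars.lower t] := by
              unfold mergeStep
              rw [if_neg]; rintro ⟨-, -, h3⟩; exact hk h3
            rw [hstep]
            by_cases hm : PySem.Chars.lower t = "mod".toList
            · rw [hm]
              have := ih (acc ++ ["mod".toList]) true (by simp)
              rw [if_pos rfl] at this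
              rw [this, mergeRec, if_neg hk, if_pos hm, List.append_assoc]
              rfl
            · have := ih ((acc ++ ["mod".toList]) ++ [PySem.Chars.lower t]) false
                (by intro _; simp [List.getLast?_append]; exact hm)
              rw [if_neg (by simp)] at this
              rw [this, mergeRec, if_neg hk, if_neg hm]
              simp
      
lemma merge_eq (ts : List (List Char)) :
    List.foldl mergeStep [] (ts.map PySem.Chars.lower) = mergeRec false ts := by
  have := foldl_mergeStep ts [] false (by simp)
  simpa using this

-- ===== VERDICT (by name: the statement is the Claim_ definition above) =====
theorem format_family_label_py_spec : Claim_equal_format_family_label_py := by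
  intro name _
  unfold Spec_format_family_label_py format_family_label_py format_family_label_py_alt
  by_cases h : name.toList = []
  · simp [h]
  · rw [if_neg h, if_neg h, merge_eq, ← fmtLoopA_eq_map]
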